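-- pv_equiv track=rewrite | github.com/herolava259/Coding-Interview-Practice | HackerRankWithAlgorithm/DynamicProgramming/MagradonaForest.py | seq_mandragora
-- ===== SOURCE A (Python) =====
-- def seq_mandragora(H):
--
--     argmax_idxs = []
--
--     maxs = 0
--     n = len(H)
--     for idx in range(n-1,-1,-1):
--         if H[idx] > maxs:
--             maxs = H[idx]
--             argmax_idxs.append(idx)
--     argmax_idxs = argmax_idxs[::-1]
--     bg = -1
--     sums = 0
--     for i in argmax_idxs:
--         sums += (i-bg)*H[i]
--         bg = i
--
--     return sums
-- ===== SOURCE B (Python) =====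
-- def seq_mandragora(H):
--     # One right-to-left pass: keep the running maximum floored at 0 and add it
--     # once per position (each position contributes the 0-floored maximum of its
--     # suffix, which is exactly A's gap-weighted sum over record indices).
--     total = 0
--     running = 0
--     for h in reversed(H):
--         running = max(running, h)
--         total += running
--     return total
-- ===== Notes on version B (the rewrite author's own statement) =====
-- stated objective: simpler
-- what changed: Replaced A's two-pass scheme (collect record indices right-to-left, reverse, then a gap-weighted second pass with repeated indexing) by a single right-to-left pass that keeps a running maximum floored at 0 and adds it once per position.
import Mathlib
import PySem

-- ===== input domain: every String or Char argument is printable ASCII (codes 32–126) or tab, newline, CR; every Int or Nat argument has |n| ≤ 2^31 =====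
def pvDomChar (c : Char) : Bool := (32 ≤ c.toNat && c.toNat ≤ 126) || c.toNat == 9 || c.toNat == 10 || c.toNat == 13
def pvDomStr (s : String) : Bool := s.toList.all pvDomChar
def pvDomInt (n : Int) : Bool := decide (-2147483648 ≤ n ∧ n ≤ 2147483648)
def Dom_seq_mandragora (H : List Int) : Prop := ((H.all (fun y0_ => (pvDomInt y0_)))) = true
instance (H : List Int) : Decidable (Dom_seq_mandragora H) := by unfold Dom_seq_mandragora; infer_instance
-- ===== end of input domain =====

-- B replaces A's two passes (record-index collection + gap-weighted sum) by one
-- right-to-left pass accumulating the 0-floored running maximum (simpler; same value).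

-- ===== PORT A =====
-- All indices produced by range(n-1,-1,-1) are in range, so the default of pyGetD is never used; A is total.
def seq_mandragora (H : List Int) : Int :=
  let n : Int := H.length
  let st := (PySem.List.pyRange (n - 1) (-1) (-1)).foldl
    (fun (st : Int × List Int) idx =>
      if st.1 < PySem.List.pyGetD H idx 0 then (PySem.List.pyGetD H idx 0, st.2 ++ [idx]) else st)
    (0, [])
  let argmax := (PySem.List.slice? st.2 none none (-1)).getD []   -- argmax_idxs[::-1]
  let res := argmax.foldl
    (fun (p : Int × Int) i => (p.1 + (i - p.2) * PySem.List.pyGetD H i 0, i))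
    (0, -1)
  res.1

-- ===== PORT B =====
def seq_mandragora_alt (H : List Int) : Int :=
  (H.reverse.foldl (fun (st : Int × Int) h =>
      let r := max st.1 h
      (r, st.2 + r)) (0, 0)).2

-- ===== PRECONDITION & SPEC =====
def Spec_seq_mandragora (H : List Int) (out : Int) : Prop := out = seq_mandragora_alt H
instance (H : List Int) (out : Int) : Decidable (Spec_seq_mandragora H out) := by unfold Spec_seq_mandragora; infer_instance

-- ===== CLAIM (what is proved, stated in full; the proofs are below) =====
def Claim_equal_seq_mandragora : Prop := ∀ (H : List Int), Dom_seq_mandragora H → Spec_seq_mandragora H (seq_mandragora H)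

-- ===== LEMMAS AND PROOFS =====

-- 0-floored maximum of the list
def pvM : List Int → Int
  | [] => 0
  | x :: t => max (pvM t) x

-- sum over all positions of the 0-floored maximum of the suffix starting there
def pvS : List Int → Int
  | [] => 0
  | x :: t => pvS t + max (pvM t) x

-- records of A's first loop, as (index, value) pairs in ascending index order, indices starting at s
def pvRecs : List Int → Int → List (Int × Int)
  | [], _ => []
  | x :: t, s => if pvM t < x then (s, x) :: pvRecs t (s + 1) else pvRecs t (s + 1)

theorem pvB_foldr (H : List Int) :
    H.foldr (fun h st => ((max st.1 h : Int), (st.2 + max st.1 h : Int))) (0, 0) = (pvM H, pvS H) := by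
  induction H with
  | nil => rfl
  | cons x t ih => simp [pvM, pvS, ih]

theorem pvA_loop1 (t : List Int) (s : Int) :
    (PySem.List.enumerate t s).foldr
      (fun q st => if st.1 < q.2 then (q.2, st.2 ++ [q.1]) else st) ((0 : Int), ([] : List Int))
      = (pvM t, ((pvRecs t s).map Prod.fst).reverse) := by
  induction t generalizing s with
  | nil => rfl
  | cons x t ih =>
    rw [PySem.List.enumerate_cons, List.foldr_cons, ih]
    by_cases h : pvM t < x
    · simp [pvRecs, pvM, h, max_eq_right h.le]
    · simp [pvRecs, pvM, h, max_eq_left (not_lt.mp h)]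

theorem pvRecs_value (t : List Int) (s : Int) (q : Int × Int) (hq : q ∈ pvRecs t s) :
    ∃ k : Nat, q.1 = s + k ∧ t.getD k 0 = q.2 := by
  induction t generalizing s with
  | nil => simp [pvRecs] at hq
  | cons x t ih =>
    by_cases h : pvM t < x
    · simp only [pvRecs, if_pos h, List.mem_cons] at hq
      rcases hq with rfl | hq
      · exact ⟨0, by simp⟩
      · obtain ⟨k, hk1, hk2⟩ := ih (s + 1) hq
        exact ⟨k + 1, by push_cast; omega, by simpa using hk2⟩
    · simp only [pvRecs, if_neg h] at hq
      obtain ⟨k, hk1, hk2⟩ := ih (s + 1) hq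
      exact ⟨k + 1, by push_cast; omega, by simpa using hk2⟩

theorem pvA_loop2 (t : List Int) (s b acc : Int) :
    ((pvRecs t s).foldl (fun (p : Int × Int) q => (p.1 + (q.1 - p.2) * q.2, q.1)) (acc, b)).1
      = acc + pvS t + (s - 1 - b) * pvM t := by
  induction t generalizing s b acc with
  | nil => simp [pvRecs, pvS, pvM]
  | cons x t ih =>
    by_cases h : pvM t < x
    · rw [pvRecs, if_pos h, List.foldl_cons, ih]
      simp only [pvS, pvM, max_eq_right h.le]; ring
    · rw [pvRecs, if_neg h, ih]
      simp only [pvS, pvM, max_eq_left (not_lt.mp h)]; ring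

-- ===== VERDICT (by name: the statement is the Claim_ definition above) =====
theorem seq_mandragora_spec : Claim_equal_seq_mandragora := by
  intro H _
  show seq_mandragora H = seq_mandragora_alt H
  unfold seq_mandragora seq_mandragora_alt
  dsimp only
  rw [List.foldl_reverse, pvB_foldr]
  have hrange : PySem.List.pyRange ((H.length : Int) - 1) (-1) (-1)
      = (PySem.List.pyRange 0 (H.length : Int) 1).reverse := by
    rw [PySem.List.pyRange_neg_one_eq_reverse]; norm_num
  rw [hrange, List.foldl_reverse]
  have henum := PySem.List.enumerate_eq_map_pyRange H (0 : Int)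
  rw [PySem.List.len_eq] at henum
  have hfold :
      (PySem.List.pyRange 0 (H.length : Int) 1).foldr
        (fun idx (st : Int × List Int) =>
          if st.1 < PySem.List.pyGetD H idx 0 then (PySem.List.pyGetD H idx 0, st.2 ++ [idx]) else st)
        (0, [])
      = (PySem.List.enumerate H 0).foldr
        (fun q (st : Int × List Int) => if st.1 < q.2 then (q.2, st.2 ++ [q.1]) else st)
        (0, []) := by
    rw [henum, List.foldr_map]
  rw [hfold, pvA_loop1 H 0]
  simp only [PySem.List.slice?_none_none_neg_one, Option.getD_some, List.reverse_reverse,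
    List.foldl_map]
  have hcongr := PySem.List.foldl_congr_mem
    (l := pvRecs H 0)
    (f := fun (p : Int × Int) q => (p.1 + (q.1 - p.2) * PySem.List.pyGetD H q.1 0, q.1))
    (g := fun (p : Int × Int) q => (p.1 + (q.1 - p.2) * q.2, q.1))
    (init := ((0 : Int), (-1 : Int)))
    (by
      intro acc q hq
      obtain ⟨k, hk1, hk2⟩ := pvRecs_value H 0 q hq
      dsimp only
      rw [hk1]; simp [PySem.List.pyGetD_natCast, ← hk2, List.getD])
  rw [hcongr, pvA_loop2 H 0 (-1) 0]
  ring
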